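-- pv_equiv track=rewrite | github.com/ctz/graviola | admin/parse-asm/driver.py | lookup_register
-- ===== SOURCE A (Python) =====
-- def lookup_register(reg):
--     for n in range(31):
--         n = str(n)
--         if reg in ["r" + n, "x" + n, "w" + n]:
--             return "x" + n
--
--     for n in range(32):
--         n = str(n)
--         if reg in ["v" + n, "q" + n, "d" + n, "s" + n, "h" + n]:
--             return "v" + n
--
--     for n in range(16):
--         n = str(n)
--         if reg == "p" + n:
--             return reg
-- ===== SOURCE B (Python) =====
-- def lookup_register(reg):
--     # split once: one-char prefix, decimal suffix; dispatch on the prefix class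
--     p, ds = reg[:1], reg[1:]
--     if not ds.isdigit():
--         return None
--     if len(ds) == 1:
--         i = ord(ds[0]) - 48
--     elif len(ds) == 2 and ds[0] != '0':
--         i = 10 * (ord(ds[0]) - 48) + (ord(ds[1]) - 48)
--     else:
--         # empty, leading zero, or three or more digits: no such register
--         return None
--     if p in "rxw" and i < 31:
--         return "x" + ds
--     if p in "vqdsh" and i < 32:
--         return "v" + ds
--     if p == "p" and i < 16:
--         return reg
--     return None
-- ===== Notes on version B (the rewrite author's own statement) =====
-- stated objective: simpler
-- what changed: Instead of scanning 79 candidate spellings built in three constant loops, B splits reg once into a one-char prefix and a digit suffix, computes the index arithmetically from the character codes (rejecting leading zeros and over-long suffixes), and dispatches on the prefix class with the 31/32/16 bounds.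
import Mathlib
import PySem

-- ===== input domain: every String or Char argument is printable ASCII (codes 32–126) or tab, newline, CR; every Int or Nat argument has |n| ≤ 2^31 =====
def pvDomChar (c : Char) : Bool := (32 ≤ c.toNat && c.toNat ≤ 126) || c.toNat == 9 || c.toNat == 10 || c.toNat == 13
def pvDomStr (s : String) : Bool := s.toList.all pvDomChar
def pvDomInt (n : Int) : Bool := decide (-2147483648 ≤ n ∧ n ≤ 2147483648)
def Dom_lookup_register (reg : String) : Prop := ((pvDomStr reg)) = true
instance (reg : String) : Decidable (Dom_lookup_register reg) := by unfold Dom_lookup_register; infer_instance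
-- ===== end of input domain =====

-- B replaces A's three constant loops over 79 candidate spellings by one prefix/suffix
-- decomposition with an arithmetic index and a single dispatch (objective: simpler).

-- ===== PORT A =====
-- first loop: for n in range(31): if reg in ["r"+str(n), "x"+str(n), "w"+str(n)]: return "x"+str(n)
-- (strings handled as their char lists; "r" + s is 'r' :: s)
def lrLoop1 (reg : List Char) : List Int → Option (List Char)
  | [] => none
  | n :: rest =>
    let s := PySem.Int.toChars n
    if reg = 'r' :: s ∨ reg = 'x' :: s ∨ reg = 'w' :: s then some ('x' :: s)
    else lrLoop1 reg rest

-- second loop: for n in range(32): if reg in ["v"+s,"q"+s,"d"+s,"s"+s,"h"+s]: return "v"+s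
def lrLoop2 (reg : List Char) : List Int → Option (List Char)
  | [] => none
  | n :: rest =>
    let s := PySem.Int.toChars n
    if reg = 'v' :: s ∨ reg = 'q' :: s ∨ reg = 'd' :: s ∨ reg = 's' :: s ∨ reg = 'h' :: s then
      some ('v' :: s)
    else lrLoop2 reg rest

-- third loop: for n in range(16): if reg == "p"+str(n): return reg
def lrLoop3 (reg : List Char) : List Int → Option (List Char)
  | [] => none
  | n :: rest =>
    let s := PySem.Int.toChars n
    if reg = 'p' :: s then some reg
    else lrLoop3 reg rest

def lookup_register (reg : String) : Option String :=
  match lrLoop1 reg.toList (PySem.List.pyRange 0 31 1) with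
  | some r => some (String.ofList r)
  | none =>
    match lrLoop2 reg.toList (PySem.List.pyRange 0 32 1) with
    | some r => some (String.ofList r)
    | none =>
      match lrLoop3 reg.toList (PySem.List.pyRange 0 16 1) with
      | some r => some (String.ofList r)
      | none => none

-- ===== PORT B =====
-- the final dispatch: if p in "rxw" and i < 31 … / elif … / elif p == "p" and i < 16 …
def lrDispatch (p ds : List Char) (i : Int) (reg : String) : Option String :=
  if PySem.Chars.isIn p ['r', 'x', 'w'] = true ∧ i < 31 then some (String.ofList ('x' :: ds))
  else if PySem.Chars.isIn p ['v', 'q', 'd', 's', 'h'] = true ∧ i < 32 then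
    some (String.ofList ('v' :: ds))
  else if p = ['p'] ∧ i < 16 then some reg
  else none

def lookup_register_alt (reg : String) : Option String :=
  let p := PySem.List.slice reg.toList none (some 1)        -- reg[:1]
  let ds := PySem.List.slice reg.toList (some 1) none       -- reg[1:]
  if PySem.Chars.strIsdigit ds = true then
    match ds with
    | [d0] => lrDispatch p ds ((d0.toNat : Int) - 48) reg                    -- len(ds) == 1
    | [d0, d1] =>                                                            -- len(ds) == 2 and ds[0] != '0'
      if d0 ≠ '0' then lrDispatch p ds (10 * ((d0.toNat : Int) - 48) + ((d1.toNat : Int) - 48)) reg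
      else none
    | _ => none
  else none

-- ===== PRECONDITION & SPEC =====
def Spec_lookup_register (reg : String) (out : Option String) : Prop := out = lookup_register_alt reg
instance (reg : String) (out : Option String) : Decidable (Spec_lookup_register reg out) := by unfold Spec_lookup_register; infer_instance

-- ===== CLAIM (what is proved, stated in full; the proofs are below) =====
def Claim_equal_lookup_register : Prop := ∀ (reg : String), Dom_lookup_register reg → Spec_lookup_register reg (lookup_register reg)

-- ===== LEMMAS AND PROOFS =====
def lrVal (cs : List Char) : Int := cs.foldl (fun a c => 10 * a + ((c.toNat : Int) - 48)) 0

lemma lrF32 : ∀ n ∈ PySem.List.pyRange 0 32 1,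
    PySem.Chars.strIsdigit (PySem.Int.toChars n) = true
    ∧ (PySem.Int.toChars n).length ≤ 2
    ∧ ((PySem.Int.toChars n).length = 2 → (PySem.Int.toChars n).head? ≠ some '0')
    ∧ lrVal (PySem.Int.toChars n) = n := by decide

lemma lrLoop1_none (reg : List Char) (l : List Int)
    (h : ∀ n ∈ l, ¬(reg = 'r' :: PySem.Int.toChars n ∨ reg = 'x' :: PySem.Int.toChars n ∨ reg = 'w' :: PySem.Int.toChars n)) :
    lrLoop1 reg l = none := by
  induction l with
  | nil => rfl
  | cons n rest ih =>
    rw [lrLoop1, if_neg (h n (by simp))]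
    exact ih fun m hm => h m (by simp [hm])

lemma lrLoop1_some (reg : List Char) (l : List Int) (n : Int)
    (hn : n ∈ l)
    (hc : reg = 'r' :: PySem.Int.toChars n ∨ reg = 'x' :: PySem.Int.toChars n ∨ reg = 'w' :: PySem.Int.toChars n)
    (hu : ∀ m ∈ l, (reg = 'r' :: PySem.Int.toChars m ∨ reg = 'x' :: PySem.Int.toChars m ∨ reg = 'w' :: PySem.Int.toChars m) → m = n) :
    lrLoop1 reg l = some ('x' :: PySem.Int.toChars n) := by
  induction l with
  | nil => cases hn
  | cons m rest ih =>
    by_cases hm : reg = 'r' :: PySem.Int.toChars m ∨ reg = 'x' :: PySem.Int.toChars m ∨ reg = 'w' :: PySem.Int.toChars m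
    · rw [lrLoop1, if_pos hm, hu m (by simp) hm]
    · rw [lrLoop1, if_neg hm]
      rcases List.mem_cons.mp hn with rfl | hn
      · exact absurd hc hm
      · exact ih hn fun m' hm' h' => hu m' (by simp [hm']) h'

lemma lrLoop2_none (reg : List Char) (l : List Int)
    (h : ∀ n ∈ l, ¬(reg = 'v' :: PySem.Int.toChars n ∨ reg = 'q' :: PySem.Int.toChars n ∨ reg = 'd' :: PySem.Int.toChars n ∨ reg = 's' :: PySem.Int.toChars n ∨ reg = 'h' :: PySem.Int.toChars n)) :
    lrLoop2 reg l = none := by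
  induction l with
  | nil => rfl
  | cons n rest ih =>
    rw [lrLoop2, if_neg (h n (by simp))]
    exact ih fun m hm => h m (by simp [hm])

lemma lrLoop2_some (reg : List Char) (l : List Int) (n : Int)
    (hn : n ∈ l)
    (hc : reg = 'v' :: PySem.Int.toChars n ∨ reg = 'q' :: PySem.Int.toChars n ∨ reg = 'd' :: PySem.Int.toChars n ∨ reg = 's' :: PySem.Int.toChars n ∨ reg = 'h' :: PySem.Int.toChars n)
    (hu : ∀ m ∈ l, (reg = 'v' :: PySem.Int.toChars m ∨ reg = 'q' :: PySem.Int.toChars m ∨ reg = 'd' :: PySem.Int.toChars m ∨ reg = 's' :: PySem.Int.toChars m ∨ reg = 'h' :: PySem.Int.toChars m) → m = n) :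
    lrLoop2 reg l = some ('v' :: PySem.Int.toChars n) := by
  induction l with
  | nil => cases hn
  | cons m rest ih =>
    by_cases hm : reg = 'v' :: PySem.Int.toChars m ∨ reg = 'q' :: PySem.Int.toChars m ∨ reg = 'd' :: PySem.Int.toChars m ∨ reg = 's' :: PySem.Int.toChars m ∨ reg = 'h' :: PySem.Int.toChars m
    · rw [lrLoop2, if_pos hm, hu m (by simp) hm]
    · rw [lrLoop2, if_neg hm]
      rcases List.mem_cons.mp hn with rfl | hn
      · exact absurd hc hm
      · exact ih hn fun m' hm' h' => hu m' (by simp [hm']) h'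

lemma lrLoop3_none (reg : List Char) (l : List Int)
    (h : ∀ n ∈ l, ¬(reg = 'p' :: PySem.Int.toChars n)) :
    lrLoop3 reg l = none := by
  induction l with
  | nil => rfl
  | cons n rest ih =>
    rw [lrLoop3, if_neg (h n (by simp))]
    exact ih fun m hm => h m (by simp [hm])

lemma lrLoop3_some (reg : List Char) (l : List Int) (n : Int)
    (hn : n ∈ l)
    (hc : reg = 'p' :: PySem.Int.toChars n) :
    lrLoop3 reg l = some reg := by
  induction l with
  | nil => cases hn
  | cons m rest ih =>
    by_cases hm : reg = 'p' :: PySem.Int.toChars m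
    · rw [lrLoop3, if_pos hm]
    · rw [lrLoop3, if_neg hm]
      rcases List.mem_cons.mp hn with rfl | hn
      · exact absurd hc hm
      · exact ih hn

lemma isIn_singleton (c : Char) (l : List Char) : PySem.Chars.isIn [c] l = true ↔ c ∈ l := by
  rw [PySem.Chars.isIn_iff_infix]
  constructor
  · intro h; exact h.mem (List.mem_singleton_self c)
  · intro h
    obtain ⟨l1, l2, rfl⟩ := List.append_of_mem h
    exact ⟨l1, l2, by simp⟩

lemma lrDispatch_eq (c : Char) (cs : List Char) (i : Int)
    (hds : PySem.Int.toChars i = cs) (hval : lrVal cs = i) (h0 : 0 ≤ i) :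
    lookup_register (String.ofList (c :: cs)) = lrDispatch [c] cs i (String.ofList (c :: cs)) := by
  have huniq : ∀ m : Int, 0 ≤ m → m < 32 → cs = PySem.Int.toChars m → m = i := by
    intro m hm1 hm2 h
    have := (lrF32 m (PySem.List.mem_pyRange_one.mpr ⟨hm1, hm2⟩)).2.2.2
    rw [← h, hval] at this; omega
  have htl : (String.ofList (c :: cs)).toList = c :: cs := String.toList_ofList
  unfold lookup_register
  rw [htl]
  by_cases hr : c = 'r' ∨ c = 'x' ∨ c = 'w'
  · have hin1 : PySem.Chars.isIn [c] ['r', 'x', 'w'] = true := by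
      rcases hr with rfl | rfl | rfl <;> decide
    by_cases hi : i < 31
    · rw [lrLoop1_some (c :: cs) _ i (PySem.List.mem_pyRange_one.mpr ⟨h0, hi⟩)
        (by rcases hr with rfl | rfl | rfl
            · exact Or.inl (by rw [hds])
            · exact Or.inr (Or.inl (by rw [hds]))
            · exact Or.inr (Or.inr (by rw [hds])))
        (by intro m hm h
            have hb := PySem.List.mem_pyRange_one.mp hm
            rcases h with h | h | h <;>
              (injection h with h1 h2; exact huniq m hb.1 (by omega) h2))]
      rw [lrDispatch, if_pos ⟨hin1, hi⟩, hds]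
    · rw [lrLoop1_none _ _ (by
        intro n hn h
        have hb := PySem.List.mem_pyRange_one.mp hn
        rcases h with h | h | h <;>
          (injection h with h1 h2; exact absurd (huniq n hb.1 (by omega) h2) (by omega))),
        lrLoop2_none _ _ (by
          intro n hn h
          rcases hr with rfl | rfl | rfl <;> rcases h with h | h | h | h | h <;>
            (injection h with h1 h2; exact absurd h1 (by decide))),
        lrLoop3_none _ _ (by
          intro n hn h
          rcases hr with rfl | rfl | rfl <;> (injection h with h1 h2; exact absurd h1 (by decide)))]
      have hin2 : PySem.Chars.isIn [c] ['v', 'q', 'd', 's', 'h'] = false := by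
        rcases hr with rfl | rfl | rfl <;> decide
      have hp : c ≠ 'p' := by rcases hr with rfl | rfl | rfl <;> decide
      simp [lrDispatch, hi, hin2, hp]
  · by_cases hv : c = 'v' ∨ c = 'q' ∨ c = 'd' ∨ c = 's' ∨ c = 'h'
    · have hin1 : PySem.Chars.isIn [c] ['r', 'x', 'w'] = false := by
        rcases hv with rfl | rfl | rfl | rfl | rfl <;> decide
      have hin2 : PySem.Chars.isIn [c] ['v', 'q', 'd', 's', 'h'] = true := by
        rcases hv with rfl | rfl | rfl | rfl | rfl <;> decide
      have hp : c ≠ 'p' := by rcases hv with rfl | rfl | rfl | rfl | rfl <;> decide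
      rw [lrLoop1_none _ _ (by
        intro n hn h
        rcases hv with rfl | rfl | rfl | rfl | rfl <;> rcases h with h | h | h <;>
          (injection h with h1 h2; exact absurd h1 (by decide)))]
      by_cases hi : i < 32
      · rw [lrLoop2_some (c :: cs) _ i (PySem.List.mem_pyRange_one.mpr ⟨h0, hi⟩)
          (by rcases hv with rfl | rfl | rfl | rfl | rfl
              · exact Or.inl (by rw [hds])
              · exact Or.inr (Or.inl (by rw [hds]))
              · exact Or.inr (Or.inr (Or.inl (by rw [hds])))
              · exact Or.inr (Or.inr (Or.inr (Or.inl (by rw [hds]))))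
              · exact Or.inr (Or.inr (Or.inr (Or.inr (by rw [hds])))))
          (by intro m hm h
              have hb := PySem.List.mem_pyRange_one.mp hm
              rcases h with h | h | h | h | h <;>
                (injection h with h1 h2; exact huniq m hb.1 (by omega) h2))]
        have hi1 : ¬ (PySem.Chars.isIn [c] ['r', 'x', 'w'] = true ∧ i < 31) := by
          rw [hin1]; rintro ⟨h, -⟩; exact absurd h (by decide)
        rw [lrDispatch, if_neg hi1, if_pos ⟨hin2, hi⟩, hds]
      · rw [lrLoop2_none _ _ (by
          intro n hn h
          have hb := PySem.List.mem_pyRange_one.mp hn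
          rcases h with h | h | h | h | h <;>
            (injection h with h1 h2; exact absurd (huniq n hb.1 (by omega) h2) (by omega))),
          lrLoop3_none _ _ (by
            intro n hn h
            injection h with h1 h2; exact hp h1)]
        have hi31 : ¬ i < 31 := by omega
        simp [lrDispatch, hin1, hin2, hp, hi, hi31]
    · by_cases hpc : c = 'p'
      · subst hpc
        rw [lrLoop1_none _ _ (by
            intro n hn h
            rcases h with h | h | h <;> (injection h with h1 h2; exact absurd h1 (by decide))),
          lrLoop2_none _ _ (by
            intro n hn h
            rcases h with h | h | h | h | h <;> (injection h with h1 h2; exact absurd h1 (by decide)))]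
        by_cases hi : i < 16
        · rw [lrLoop3_some ('p' :: cs) _ i (PySem.List.mem_pyRange_one.mpr ⟨h0, hi⟩) (by rw [hds])]
          rw [lrDispatch, if_neg (by rintro ⟨h, -⟩; exact absurd h (by decide)),
            if_neg (by rintro ⟨h, -⟩; exact absurd h (by decide)), if_pos ⟨rfl, hi⟩]
        · rw [lrLoop3_none _ _ (by
            intro n hn h
            have hb := PySem.List.mem_pyRange_one.mp hn
            injection h with h1 h2; exact absurd (huniq n hb.1 (by omega) h2) (by omega))]
          have e1 : PySem.Chars.isIn ['p'] ['r', 'x', 'w'] = false := by decide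
          have e2 : PySem.Chars.isIn ['p'] ['v', 'q', 'd', 's', 'h'] = false := by decide
          simp [lrDispatch, hi, e1, e2]
      · rw [lrLoop1_none _ _ (by
            intro n hn h
            rcases h with h | h | h <;> (injection h with h1 h2; subst h1; exact hr (by simp))),
          lrLoop2_none _ _ (by
            intro n hn h
            rcases h with h | h | h | h | h <;> (injection h with h1 h2; subst h1; exact hv (by simp))),
          lrLoop3_none _ _ (by
            intro n hn h
            injection h with h1 h2; exact hpc h1)]
        have hin1 : PySem.Chars.isIn [c] ['r', 'x', 'w'] = false := by
          rw [← Bool.not_eq_true, isIn_singleton]; simp; tauto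
        have hin2 : PySem.Chars.isIn [c] ['v', 'q', 'd', 's', 'h'] = false := by
          rw [← Bool.not_eq_true, isIn_singleton]; simp; tauto
        simp [lrDispatch, hin1, hin2, hpc]

lemma isdigit_iff (c : Char) : PySem.Chars.isdigit c = true ↔ 48 ≤ c.toNat ∧ c.toNat ≤ 57 := by
  unfold PySem.Chars.isdigit
  rw [Bool.and_eq_true, decide_eq_true_iff, decide_eq_true_iff, Char.le_def, Char.le_def,
    UInt32.le_iff_toNat_le, UInt32.le_iff_toNat_le]
  constructor <;> intro h <;> exact ⟨by exact_mod_cast h.1, by exact_mod_cast h.2⟩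

lemma digit_ofNat (d : Char) (h : PySem.Chars.isdigit d = true) :
    ∃ k, k ≤ 9 ∧ d = Char.ofNat (48 + k) := by
  rw [isdigit_iff] at h
  refine ⟨d.toNat - 48, by omega, ?_⟩
  have := Char.ofNat_toNat d
  rw [show 48 + (d.toNat - 48) = d.toNat by omega, this]

lemma one_digit (d : Char) (h : PySem.Chars.isdigit d = true) :
    PySem.Int.toChars ((d.toNat : Int) - 48) = [d] := by
  obtain ⟨k, hk, rfl⟩ := digit_ofNat d h
  interval_cases k <;> decide

lemma two_digit (d0 d1 : Char) (h0 : PySem.Chars.isdigit d0 = true)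
    (h1 : PySem.Chars.isdigit d1 = true) (hnz : d0 ≠ '0') :
    PySem.Int.toChars (10 * ((d0.toNat : Int) - 48) + ((d1.toNat : Int) - 48)) = [d0, d1] := by
  obtain ⟨k0, hk0, rfl⟩ := digit_ofNat d0 h0
  obtain ⟨k1, hk1, rfl⟩ := digit_ofNat d1 h1
  have hk0' : 1 ≤ k0 := by
    rcases Nat.eq_zero_or_pos k0 with h | h
    · subst h; exact absurd rfl hnz
    · exact h
  clear hnz h0 h1
  interval_cases k0 <;> interval_cases k1 <;> decide

lemma lrA_none (c : Char) (cs : List Char)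
    (hbad : ∀ n : Int, 0 ≤ n → n < 32 → cs ≠ PySem.Int.toChars n) :
    lookup_register (String.ofList (c :: cs)) = none := by
  unfold lookup_register
  rw [String.toList_ofList]
  rw [lrLoop1_none _ _ (by
      intro n hn h
      have hb := PySem.List.mem_pyRange_one.mp hn
      rcases h with h | h | h <;>
        (injection h with h1 h2; exact hbad n hb.1 (by omega) h2)),
    lrLoop2_none _ _ (by
      intro n hn h
      have hb := PySem.List.mem_pyRange_one.mp hn
      rcases h with h | h | h | h | h <;>
        (injection h with h1 h2; exact hbad n hb.1 (by omega) h2)),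
    lrLoop3_none _ _ (by
      intro n hn h
      have hb := PySem.List.mem_pyRange_one.mp hn
      injection h with h1 h2; exact hbad n hb.1 (by omega) h2)]

theorem lr_key (L : List Char) :
    lookup_register (String.ofList L) = lookup_register_alt (String.ofList L) := by
  cases L with
  | nil => decide
  | cons c cs =>
    unfold lookup_register_alt
    rw [String.toList_ofList]
    have hp : PySem.List.slice (c :: cs) none (some 1) = [c] := by
      rw [PySem.List.slice_to _ (by norm_num : (0:Int) ≤ 1)]; norm_num
    have hds : PySem.List.slice (c :: cs) (some 1) none = cs := by
      rw [PySem.List.slice_from _ (by norm_num : (0:Int) ≤ 1)]; norm_num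
    simp only [hp, hds]
    by_cases hdig : PySem.Chars.strIsdigit cs = true
    · rw [if_pos hdig]
      have hall : ∀ d ∈ cs, PySem.Chars.isdigit d = true := by
        simp only [PySem.Chars.strIsdigit, Bool.and_eq_true, List.all_eq_true] at hdig
        exact fun d hd => hdig.2 d hd
      match cs, hall with
      | [d0], hall =>
        dsimp only []
        have hd0 := hall d0 (by simp)
        have hb := (isdigit_iff d0).mp hd0
        exact lrDispatch_eq c [d0] _ (one_digit d0 hd0)
          (by simp [lrVal]) (by omega)
      | [d0, d1], hall =>
        dsimp only []
        have hd0 := hall d0 (by simp)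
        have hd1 := hall d1 (by simp)
        have hb0 := (isdigit_iff d0).mp hd0
        by_cases hz : d0 = '0'
        · subst hz
          simp only [ne_eq, not_true_eq_false, if_false]
          exact (lrA_none c _ (by
            intro n h1 h2 h
            have hf := (lrF32 n (PySem.List.mem_pyRange_one.mpr ⟨h1, h2⟩)).2.2.1
            rw [← h] at hf
            exact hf rfl (by simp)))
        · rw [if_pos hz]
          exact lrDispatch_eq c [d0, d1] _ (two_digit d0 d1 hd0 hd1 hz)
            (by simp [lrVal]; try ring) (by
              have hb1 := (isdigit_iff d1).mp hd1
              have h48 : d0.toNat ≠ 48 := fun h => hz (by rw [← Char.ofNat_toNat d0, h]; try rfl)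
              omega)
      | d0 :: d1 :: d2 :: rest, hall =>
        dsimp only []
        exact lrA_none c _ (by
          intro n h1 h2 h
          have hf := (lrF32 n (PySem.List.mem_pyRange_one.mpr ⟨h1, h2⟩)).2.1
          rw [← h] at hf
          simp at hf)
    · rw [if_neg hdig]
      exact lrA_none c _ (by
        intro n h1 h2 h
        have hf := (lrF32 n (PySem.List.mem_pyRange_one.mpr ⟨h1, h2⟩)).1
        rw [← h] at hf
        exact hdig hf)

-- ===== VERDICT (by name: the statement is the Claim_ definition above) =====
theorem lookup_register_spec : Claim_equal_lookup_register := by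
  intro reg _
  unfold Spec_lookup_register
  have h := lr_key reg.toList
  rwa [String.ofList_toList] at h
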